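-- pv_equiv track=rewrite | github.com/CDMY0417/Tool_MATH | function_tools/function_total/1yr6z4.py | has_exactly_four_factors
-- ===== SOURCE A (Python) =====
-- def has_exactly_four_factors(n: int) -> bool:
--     num_factors = 0
--     for i in range(1, int(n**0.5) + 1):
--         if n % i == 0:
--             if i * i == n:
--                 num_factors += 1
--             else:
--                 num_factors += 2
--         if num_factors > 4:
--             return False
--     return num_factors == 4
-- ===== SOURCE B (Python) =====
-- def has_exactly_four_factors(n: int) -> bool:
--     # B: trial-division factorization; the divisor count is the product of
--     # (exponent+1) over prime factors, so test whether that product is 4.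
--     if n < 2:
--         return False
--     m = n
--     d = 1
--     p = 2
--     while p * p <= m:
--         if m % p == 0:
--             e = 0
--             while m % p == 0:
--                 m //= p
--                 e += 1
--             d *= e + 1
--         p += 1
--     if m > 1:
--         d *= 2
--     return d == 4
-- ===== Notes on version B (the rewrite author's own statement) =====
-- stated objective: alternative
-- what changed: A counts divisors by testing every i up to sqrt(n); B factorizes n by trial division, dividing out each found factor, and checks whether the product of (exponent+1) equals 4.
import Mathlib
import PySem

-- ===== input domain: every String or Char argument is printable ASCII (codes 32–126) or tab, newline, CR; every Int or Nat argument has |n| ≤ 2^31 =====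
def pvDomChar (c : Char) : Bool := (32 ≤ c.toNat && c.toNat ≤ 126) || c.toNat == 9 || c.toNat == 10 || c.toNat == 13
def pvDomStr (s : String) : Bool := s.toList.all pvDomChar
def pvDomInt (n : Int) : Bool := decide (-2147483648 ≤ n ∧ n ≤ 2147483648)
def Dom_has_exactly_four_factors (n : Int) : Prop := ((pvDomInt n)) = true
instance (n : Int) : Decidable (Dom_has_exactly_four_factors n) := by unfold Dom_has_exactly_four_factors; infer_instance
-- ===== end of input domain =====

-- B replaces A's scan of every candidate divisor up to sqrt(n) by trial-division
-- factorization, checking whether the product of (exponent+1) equals 4.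

-- ===== PORT A =====
-- the for-loop with its early `return False`
def loopA (n : Int) : List Int → Int → Bool
  | [], c => c == 4
  | i :: rest, c =>
    let c' := if PySem.Int.mod n i == 0 then (if i * i == n then c + 1 else c + 2) else c
    if 4 < c' then false else loopA n rest c'

-- `int(n**0.5)` equals the integer sqrt for every 0 ≤ n ≤ 2^31 (the float is
-- exact there, checked exhaustively near squares); for negative n Python raises
-- TypeError, excluded by Pre_.
def has_exactly_four_factors (n : Int) : Bool :=
  loopA n (PySem.List.pyRange 1 ((Nat.sqrt n.toNat : Int) + 1) 1) 0

-- ===== PORT B =====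
-- inner while: divide p out of m, returning (e, m′) with m = p^e * m′, p ∤ m′
def extractB (p m : Nat) : Nat × Nat :=
  if h : m % p = 0 ∧ 2 ≤ p ∧ 1 ≤ m then
    let r := extractB p (m / p)
    (r.1 + 1, r.2)
  else (0, m)
termination_by m
decreasing_by exact Nat.div_lt_self h.2.2 h.2.1

theorem extractB_le (p m : Nat) : (extractB p m).2 ≤ m := by
  induction m using Nat.strong_induction_on with
  | _ m ih =>
    unfold extractB
    split
    · next h =>
        have h3 := ih (m / p) (Nat.div_lt_self h.2.2 h.2.1)
        simpa using le_trans h3 (Nat.div_le_self m p)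
    · simp

-- outer while over trial divisors p (the `2 ≤ p` conjunct only makes the
-- recursion total; it holds on every call the port makes)
def loopB (p m d : Nat) : Nat × Nat :=
  if h : p * p ≤ m ∧ 2 ≤ p then
    if m % p = 0 then
      let r := extractB p m
      loopB (p + 1) r.2 (d * (r.1 + 1))
    else loopB (p + 1) m d
  else (m, d)
termination_by m + 1 - p
decreasing_by
  · have h1 : p + p ≤ p * p := by
      calc p + p = p * 2 := by ring
      _ ≤ p * p := Nat.mul_le_mul_left p h.2
    have h2 := extractB_le p m
    omega
  · have h1 : p + p ≤ p * p := by
      calc p + p = p * 2 := by ring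
      _ ≤ p * p := Nat.mul_le_mul_left p h.2
    omega

def has_exactly_four_factors_alt (n : Int) : Bool :=
  if n < 2 then false
  else
    let r := loopB 2 n.toNat 1
    let d := if 1 < r.1 then r.2 * 2 else r.2
    d == 4

-- ===== PRECONDITION & SPEC =====
-- Pre_ excludes negative n, where A raises TypeError (int() of a complex n**0.5).
def Pre_has_exactly_four_factors (n : Int) : Prop := 0 ≤ n
instance (n : Int) : Decidable (Pre_has_exactly_four_factors n) := by unfold Pre_has_exactly_four_factors; infer_instance

def pvWitness_has_exactly_four_factors : Int := 10

def Spec_has_exactly_four_factors (n : Int) (out : Bool) : Prop := out = has_exactly_four_factors_alt n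
instance (n : Int) (out : Bool) : Decidable (Spec_has_exactly_four_factors n out) := by unfold Spec_has_exactly_four_factors; infer_instance

-- ===== CLAIM (what is proved, stated in full; the proofs are below) =====
def Claim_equal_has_exactly_four_factors : Prop := ∀ (n : Int), Dom_has_exactly_four_factors n → Pre_has_exactly_four_factors n → Spec_has_exactly_four_factors n (has_exactly_four_factors n)

-- ===== LEMMAS AND PROOFS =====

-- A's per-index contribution, in Nat
def gA (n i : Nat) : Nat := if n % i = 0 then (if i * i = n then 1 else 2) else 0

def fA (n : Int) (i : Int) : Int :=
  if PySem.Int.mod n i == 0 then (if i * i == n then (1 : Int) else 2) else 0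

theorem fA_nonneg (n i : Int) : 0 ≤ fA n i := by
  unfold fA; split_ifs <;> omega

theorem loopA_eq (n : Int) (l : List Int) (c : Int) (hc : 0 ≤ c) :
    loopA n l c = decide (c + (l.map (fA n)).sum = 4) := by
  induction l generalizing c with
  | nil => by_cases h : c = (4:Int) <;> simp [loopA, h]
  | cons i rest ih =>
    have hs : 0 ≤ (rest.map (fA n)).sum :=
      List.sum_nonneg (by rintro x hx; simp only [List.mem_map] at hx
                          obtain ⟨y, _, rfl⟩ := hx; exact fA_nonneg n y)
    have hf := fA_nonneg n i
    show (let c' := if PySem.Int.mod n i == 0 then (if i * i == n then c + 1 else c + 2) else c;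
          if 4 < c' then false else loopA n rest c') = _
    have hc' : (if PySem.Int.mod n i == 0 then (if i * i == n then c + 1 else c + 2) else c)
        = c + fA n i := by unfold fA; split_ifs <;> ring
    simp only [hc']
    by_cases h4 : 4 < c + fA n i
    · simp only [if_pos h4, List.map_cons, List.sum_cons]
      have : ¬ (c + (fA n i + (rest.map (fA n)).sum) = 4) := by omega
      simp [this]
    · simp only [if_neg h4, List.map_cons, List.sum_cons]
      rw [ih (c + fA n i) (by omega)]
      congr 1
      simp only [eq_iff_iff]
      constructor <;> intro h <;> omega

theorem fA_cast (N k : Nat) : fA (N : Int) ((1 : Int) + (k : Nat)) = (gA N (1 + k) : Int) := by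
  unfold fA gA
  have h1 : (1 : Int) + (k : Nat) = ((1 + k : Nat) : Int) := by push_cast; ring
  rw [h1, PySem.Int.mod_natCast]
  by_cases hm : N % (1 + k) = 0
  · by_cases hsq : (1 + k) * (1 + k) = N
    · have hc : ((1:Int) + (k : Nat)) * ((1:Int) + (k : Nat)) = (N : Int) := by
        exact_mod_cast congrArg (Nat.cast (R := Int)) hsq
      simp [hm, hsq, hc]
    · have hc : ¬ (((1:Int) + (k : Nat)) * ((1:Int) + (k : Nat)) = (N : Int)) := by
        intro hcontra; exact hsq (by exact_mod_cast hcontra)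
      simp [hm, hsq, hc]
  · have hd : ¬ (((1:Int) + (k : Nat)) ∣ (N : Int)) := by
      intro hcontra
      have h3 : ((1 + k : Nat) : Int) ∣ (N : Int) := by push_cast; exact hcontra
      exact hm ((Nat.dvd_iff_mod_eq_zero).mp (Int.natCast_dvd_natCast.mp h3))
    simp [hm, hd]

theorem list_range_sum' (n : Nat) (f : Nat → Nat) :
    ((List.range n).map f).sum = ∑ i ∈ Finset.range n, f i := by
  induction n with
  | zero => simp
  | succ n ih => simp [List.range_succ, Finset.sum_range_succ, ih]

theorem sum_shift (s : Nat) (f : Nat → Nat) :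
    ∑ k ∈ Finset.range s, f (1 + k) = ∑ i ∈ Finset.Icc 1 s, f i := by
  induction s with
  | zero => simp
  | succ s ih =>
    rw [Finset.sum_range_succ, Finset.sum_Icc_succ_top (by omega), ih, Nat.add_comm 1 s]

-- the pyRange sum equals the Nat Finset sum of gA over 1..s
theorem sumA_eq (N : Nat) :
    ((PySem.List.pyRange 1 ((Nat.sqrt N : Int) + 1) 1).map (fA (N : Int))).sum
      = ((∑ i ∈ Finset.Icc 1 (Nat.sqrt N), gA N i : Nat) : Int) := by
  rw [PySem.List.pyRange_one]
  rw [show ((Nat.sqrt N : Int) + 1 - 1).toNat = Nat.sqrt N from by omega]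
  rw [List.map_map]
  have hmap : ((List.range (Nat.sqrt N)).map (fA (N : Int) ∘ fun k => (1:Int) + ↑k))
      = (List.range (Nat.sqrt N)).map (fun k => ((gA N (1 + k) : Nat) : Int)) := by
    apply List.map_congr_left
    intro k _
    exact fA_cast N k
  rw [hmap, show ((List.range (Nat.sqrt N)).map (fun k => ((gA N (1 + k) : Nat) : Int)))
      = ((List.range (Nat.sqrt N)).map (fun k => gA N (1 + k))).map (Nat.cast) from by
        rw [List.map_map]; rfl]
  rw [← Nat.cast_list_sum, list_range_sum', sum_shift]

theorem mem_div_helper (n a : Nat) (hn : 1 ≤ n) (had : a ∣ n) (hgt : n < a * a) :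
    n / a ∣ n ∧ n / a * (n / a) < n := by
  have hapos : 0 < a := Nat.pos_of_dvd_of_pos had (by omega)
  have hdd : n / a ∣ n := Nat.div_dvd_of_dvd had
  have hlt : n / a < a := Nat.div_lt_of_lt_mul hgt
  have hpos : 0 < n / a := Nat.div_pos (Nat.le_of_dvd (by omega) had) hapos
  have hmc : a * (n / a) = n := Nat.mul_div_cancel' had
  exact ⟨hdd, by nlinarith⟩

-- counting divisors by scanning i ≤ √n and pairing i with n / i
theorem card_divisors_eq_sum (n : Nat) (hn : 1 ≤ n) :
    n.divisors.card = ∑ i ∈ Finset.Icc 1 (Nat.sqrt n), gA n i := by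
  have hstep1 : ∑ i ∈ Finset.Icc 1 (Nat.sqrt n), gA n i
      = ∑ i ∈ (Finset.Icc 1 (Nat.sqrt n)).filter (fun i => n % i = 0),
          (if i * i = n then 1 else 2) := by
    rw [Finset.sum_filter]
    exact Finset.sum_congr rfl (fun i _ => rfl)
  have hset : (Finset.Icc 1 (Nat.sqrt n)).filter (fun i => n % i = 0)
      = n.divisors.filter (fun i => i * i ≤ n) := by
    ext i
    simp only [Finset.mem_filter, Finset.mem_Icc, Nat.mem_divisors]
    constructor
    · rintro ⟨⟨h1, h2⟩, h3⟩
      exact ⟨⟨Nat.dvd_of_mod_eq_zero h3, by omega⟩, Nat.le_sqrt.mp h2⟩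
    · rintro ⟨⟨hd, _⟩, hle⟩
      have h1 : 1 ≤ i := Nat.pos_of_dvd_of_pos hd (by omega)
      exact ⟨⟨h1, Nat.le_sqrt.mpr hle⟩, Nat.mod_eq_zero_of_dvd hd⟩
  have hsum2 : ∑ i ∈ n.divisors.filter (fun i => i * i ≤ n), (if i * i = n then (1:Nat) else 2)
      = (n.divisors.filter (fun i => i * i ≤ n)).card
        + ((n.divisors.filter (fun i => i * i ≤ n)).filter (fun i => ¬ i * i = n)).card := by
    have hterm : ∀ i, (if i * i = n then (1:Nat) else 2)
        = 1 + (if ¬ i * i = n then 1 else 0) := by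
      intro i; by_cases h : i * i = n <;> simp [h]
    rw [Finset.sum_congr rfl (fun i _ => hterm i), Finset.sum_add_distrib,
      Finset.sum_const, smul_eq_mul, mul_one, ← Finset.card_filter]
  have hltfilter : (n.divisors.filter (fun i => i * i ≤ n)).filter (fun i => ¬ i * i = n)
      = n.divisors.filter (fun i => i * i < n) := by
    rw [Finset.filter_filter]
    exact Finset.filter_congr (fun i _ => by omega)
  have hsplit : (n.divisors.filter (fun i => i * i ≤ n)).card
      + (n.divisors.filter (fun i => n < i * i)).card = n.divisors.card := by
    have h := Finset.card_filter_add_card_filter_not (s := n.divisors) (p := fun i => i * i ≤ n)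
    rw [show n.divisors.filter (fun i => ¬ i * i ≤ n)
        = n.divisors.filter (fun i => n < i * i) from
      Finset.filter_congr (fun i _ => by omega)] at h
    exact h
  have hbij : (n.divisors.filter (fun i => n < i * i)).card
      = (n.divisors.filter (fun i => i * i < n)).card := by
    apply Finset.card_bij (fun d _ => n / d)
    · intro a ha
      simp only [Finset.mem_filter, Nat.mem_divisors] at ha ⊢
      obtain ⟨⟨had, hne⟩, hgt⟩ := ha
      obtain ⟨h1, h2⟩ := mem_div_helper n a hn had hgt
      exact ⟨⟨h1, hne⟩, h2⟩
    · intro a1 ha1 a2 ha2 heq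
      simp only [Finset.mem_filter, Nat.mem_divisors] at ha1 ha2
      have h1 := Nat.div_div_self ha1.1.1 ha1.1.2
      have h2 := Nat.div_div_self ha2.1.1 ha2.1.2
      rw [← h1, ← h2, heq]
    · intro b hb
      simp only [Finset.mem_filter, Nat.mem_divisors] at hb
      obtain ⟨⟨hbd, hne⟩, hblt⟩ := hb
      have hbpos : 0 < b := Nat.pos_of_dvd_of_pos hbd (by omega)
      have hdd : n / b ∣ n := Nat.div_dvd_of_dvd hbd
      have hmc : b * (n / b) = n := Nat.mul_div_cancel' hbd
      have hblt2 : b < n / b := Nat.lt_of_mul_lt_mul_left (a := b) (by omega)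
      have hgt : n < n / b * (n / b) := by nlinarith
      refine ⟨n / b, ?_, Nat.div_div_self hbd hne⟩
      simp only [Finset.mem_filter, Nat.mem_divisors]
      exact ⟨⟨hdd, hne⟩, hgt⟩
  rw [hstep1, hset, hsum2, hltfilter]
  omega

theorem A_nat (N : Nat) : has_exactly_four_factors (N : Int) = (N.divisors.card == 4) := by
  by_cases h0 : N = 0
  · subst h0; decide
  · unfold has_exactly_four_factors
    rw [Int.toNat_natCast, loopA_eq _ _ 0 le_rfl, sumA_eq,
      ← card_divisors_eq_sum N (by omega)]
    by_cases hc : N.divisors.card = 4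
    · simp [hc]
    · have hne : ¬((N.divisors.card : Int) = 4) := by omega
      simp [hc, hne]

-- if p divides m and every prime factor of m is ≥ p, then p is prime
theorem prime_of_min (p m : Nat) (hp : 2 ≤ p) (hd : p ∣ m) (hm : 1 ≤ m)
    (hmin : ∀ q, q.Prime → q ∣ m → p ≤ q) : p.Prime := by
  have hne : p ≠ 1 := by omega
  have hq := Nat.minFac_prime hne
  have h1 : p.minFac ∣ m := dvd_trans (Nat.minFac_dvd p) hd
  have h2 := hmin _ hq h1
  have h3 := Nat.minFac_le (show 0 < p by omega)
  have : p.minFac = p := le_antisymm h3 h2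
  rw [← this]; exact hq

-- if every prime factor of m exceeds √m then m is prime
theorem prime_of_no_small (m p : Nat) (h2 : 2 ≤ m) (hpp : m < p * p)
    (hmin : ∀ q, q.Prime → q ∣ m → p ≤ q) : m.Prime := by
  have hq := Nat.minFac_prime (show m ≠ 1 by omega)
  have hqd := Nat.minFac_dvd m
  have hqp := hmin _ hq hqd
  have hme : m = m.minFac * (m / m.minFac) := (Nat.mul_div_cancel' hqd).symm
  by_cases h1 : m / m.minFac = 1
  · have hme2 : m = m.minFac := by rw [h1, Nat.mul_one] at hme; exact hme
    have hgoal := hq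
    rwa [← hme2] at hgoal
  · exfalso
    have hpos : 1 ≤ m / m.minFac := Nat.div_pos (Nat.minFac_le (by omega)) hq.pos
    have h1' : 2 ≤ m / m.minFac := by omega
    have hr := Nat.minFac_prime (show m / m.minFac ≠ 1 by omega)
    have hrd : (m / m.minFac).minFac ∣ m := dvd_trans (Nat.minFac_dvd _) (Nat.div_dvd_of_dvd hqd)
    have hrp := hmin _ hr hrd
    have hrle := Nat.minFac_le (show 0 < m / m.minFac by omega)
    have : p * p ≤ m := by
      calc p * p ≤ m.minFac * (m / m.minFac) :=
            Nat.mul_le_mul hqp (le_trans hrp hrle)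
        _ = m := hme.symm
    omega

theorem extractB_spec (p m : Nat) (hp : 2 ≤ p) (hm : 1 ≤ m) :
    m = p ^ (extractB p m).1 * (extractB p m).2 ∧ ¬ p ∣ (extractB p m).2
      ∧ 1 ≤ (extractB p m).2 := by
  induction m using Nat.strong_induction_on with
  | _ m ih =>
    unfold extractB
    split
    · next h =>
        have hdvd : p ∣ m := Nat.dvd_of_mod_eq_zero h.1
        have hlt : m / p < m := Nat.div_lt_self h.2.2 h.2.1
        have hpos : 1 ≤ m / p := Nat.div_pos (Nat.le_of_dvd (by omega) hdvd) (by omega)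
        obtain ⟨h1, h2, h3⟩ := ih (m / p) hlt hpos
        refine ⟨?_, by simpa using h2, by simpa using h3⟩
        have : p * (m / p) = m := Nat.mul_div_cancel' hdvd
        calc m = p * (m / p) := this.symm
          _ = p * (p ^ (extractB p (m / p)).1 * (extractB p (m / p)).2) := by rw [← h1]
          _ = p ^ ((extractB p (m / p)).1 + 1) * (extractB p (m / p)).2 := by ring
    · next h =>
        have hnd : ¬ (m % p = 0) := by
          intro hc; exact h ⟨hc, hp, hm⟩
        refine ⟨by simp, ?_, by simpa using hm⟩
        simpa using fun hc => hnd (Nat.mod_eq_zero_of_dvd hc)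

theorem prime_card_divisors (q : Nat) (hq : q.Prime) : q.divisors.card = 2 := by
  rw [hq.divisors]
  rw [Finset.card_insert_of_notMem (by simp; exact fun hc => hq.ne_one hc.symm)]
  simp

theorem loopB_spec (p m d : Nat) :
    2 ≤ p → 1 ≤ m → (∀ q, q.Prime → q ∣ m → p ≤ q) →
    (if 1 < (loopB p m d).1 then (loopB p m d).2 * 2 else (loopB p m d).2)
      = d * m.divisors.card := by
  induction p, m, d using loopB.induct with
  | case1 p m d h hmod r ih =>
    intro hp hm hmin
    have hr : r = extractB p m := rfl
    have hdvd : p ∣ m := Nat.dvd_of_mod_eq_zero hmod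
    have hprime : p.Prime := prime_of_min p m hp hdvd hm hmin
    obtain ⟨he, hnd, hm'⟩ := extractB_spec p m hp hm
    have hmin' : ∀ q, q.Prime → q ∣ (extractB p m).2 → p + 1 ≤ q := by
      intro q hqp hqd
      have hqm : q ∣ m := hqd.trans (Dvd.intro_left _ he.symm)
      have h1 := hmin q hqp hqm
      rcases Nat.lt_or_ge p q with hlt | hge
      · omega
      · exfalso
        have hqe : q = p := le_antisymm (by omega) h1
        exact hnd (hqe ▸ hqd)
    have hstep := ih (by omega) hm' (by rw [hr]; exact hmin')
    rw [loopB]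
    simp only [dif_pos h, if_pos hmod]
    rw [hr] at hstep
    rw [hstep]
    have hcop : (p ^ (extractB p m).1).Coprime (extractB p m).2 :=
      (hprime.coprime_iff_not_dvd.mpr hnd).pow_left _
    have hcard : m.divisors.card
        = (p ^ (extractB p m).1).divisors.card * (extractB p m).2.divisors.card := by
      conv_lhs => rw [he]
      exact hcop.card_divisors_mul
    have hpow : (p ^ (extractB p m).1).divisors.card = (extractB p m).1 + 1 := by
      rw [Nat.divisors_prime_pow hprime, Finset.card_map, Finset.card_range]
    rw [hcard, hpow]
    ring
  | case2 p m d h hmod ih =>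
    intro hp hm hmin
    have hmin' : ∀ q, q.Prime → q ∣ m → p + 1 ≤ q := by
      intro q hqp hqd
      have h1 := hmin q hqp hqd
      rcases Nat.lt_or_ge p q with hlt | hge
      · omega
      · exfalso
        have : q = p := le_antisymm (by omega) h1
        exact hmod (Nat.mod_eq_zero_of_dvd (this ▸ hqd))
    have hstep := ih (by omega) hm hmin'
    rw [loopB]
    simp only [dif_pos h, if_neg hmod]
    exact hstep
  | case3 p m d h =>
    intro hp hm hmin
    rw [loopB]
    simp only [dif_neg h]
    have hlt : m < p * p := by
      rcases Nat.lt_or_ge m (p * p) with h1 | h1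
      · exact h1
      · exact absurd ⟨h1, hp⟩ h
    by_cases hm1 : m = 1
    · subst hm1; simp
    · have hmp : m.Prime := prime_of_no_small m p (by omega) hlt hmin
      have : 1 < m := hmp.one_lt
      rw [if_pos this, prime_card_divisors m hmp]

theorem B_nat (N : Nat) : has_exactly_four_factors_alt (N : Int) = (N.divisors.card == 4) := by
  by_cases h2 : N < 2
  · interval_cases N <;> decide
  · unfold has_exactly_four_factors_alt
    rw [if_neg (show ¬((N : Int) < 2) by omega), Int.toNat_natCast]
    have hstep := loopB_spec 2 N 1 (by omega) (by omega) (fun q hq _ => hq.two_le)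
    rw [one_mul] at hstep
    show ((if 1 < (loopB 2 N 1).1 then (loopB 2 N 1).2 * 2 else (loopB 2 N 1).2) == 4) = _
    rw [hstep]

-- ===== VERDICT (by name: the statement is the Claim_ definition above) =====
theorem has_exactly_four_factors_spec : Claim_equal_has_exactly_four_factors := by
  intro n _ hpre
  unfold Spec_has_exactly_four_factors
  have hn : n = ((n.toNat : Nat) : Int) := by
    have := Int.toNat_of_nonneg hpre; omega
  rw [hn, A_nat, B_nat]
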